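-- pv_equiv track=rewrite | github.com/radiant803/SiliconBench | workloads_sc.py | matrix_math
-- ===== SOURCE A (Python) =====
-- def matrix_math(iterations=10_000):
--     """
--     3x3 and 4x4 Matrix multiplication.
--     """
--     mat_a = [[1, 2, 3, 4], [5, 6, 7, 8], [9, 1, 2, 3], [4, 5, 6, 7]]
--     mat_b = [[2, 0, 1, 2], [1, 2, 0, 1], [0, 1, 2, 0], [2, 1, 0, 2]]
--
--     def mat_mul_4x4(a, b):
--         c = [[0]*4 for _ in range(4)]
--         for i in range(4):
--             for j in range(4):
--                 for k in range(4):
--                     c[i][j] += a[i][k] * b[k][j]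
--         return c
--
--     final_val = 0
--     for _ in range(iterations):
--         res = mat_mul_4x4(mat_a, mat_b)
--         final_val += res[0][0]
--     return final_val
-- ===== SOURCE B (Python) =====
-- def matrix_math(iterations=10_000):
--     """
--     3x3 and 4x4 Matrix multiplication.
--     """
--     mat_a = [[1, 2, 3, 4], [5, 6, 7, 8], [9, 1, 2, 3], [4, 5, 6, 7]]
--     mat_b = [[2, 0, 1, 2], [1, 2, 0, 1], [0, 1, 2, 0], [2, 1, 0, 2]]
--
--     # Each loop iteration adds the same res[0][0], so multiply the full
--     # product (computed ONCE, by transpose + row/column dot products rather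
--     # than triple index loops) by the non-negative iteration count.
--     bt = list(zip(*mat_b))
--     res = [[sum(x * y for x, y in zip(row, col)) for col in bt]
--            for row in mat_a]
--     return res[0][0] * max(iterations, 0)
-- ===== Notes on version B (the rewrite author's own statement) =====
-- stated objective: faster
-- what changed: Instead of recomputing the 4x4 product with triple index loops once per iteration and accumulating res[0][0], B computes the product once via transpose + zip dot products and multiplies res[0][0] by max(iterations, 0).
import Mathlib
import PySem

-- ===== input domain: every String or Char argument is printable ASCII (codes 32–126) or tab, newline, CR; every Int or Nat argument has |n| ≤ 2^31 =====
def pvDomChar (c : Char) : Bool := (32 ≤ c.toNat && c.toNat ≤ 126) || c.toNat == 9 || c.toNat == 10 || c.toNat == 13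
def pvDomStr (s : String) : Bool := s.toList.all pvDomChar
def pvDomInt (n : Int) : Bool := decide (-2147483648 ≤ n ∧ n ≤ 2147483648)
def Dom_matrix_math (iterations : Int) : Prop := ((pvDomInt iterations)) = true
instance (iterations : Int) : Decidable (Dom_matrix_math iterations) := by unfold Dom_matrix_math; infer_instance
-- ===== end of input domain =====

-- B computes the 4x4 product once (transpose + zip dot products) and scales res[0][0] by max(iterations, 0); A redoes the triple-loop product every iteration.

-- ===== PORT A =====
def pvMatA : List (List Int) := [[1, 2, 3, 4], [5, 6, 7, 8], [9, 1, 2, 3], [4, 5, 6, 7]]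
def pvMatB : List (List Int) := [[2, 0, 1, 2], [1, 2, 0, 1], [0, 1, 2, 0], [2, 1, 0, 2]]

-- c[i][j] read; loop indices are 0..3 so pyGetD's default is never used
def pvGet2 (c : List (List Int)) (i j : Int) : Int :=
  PySem.List.pyGetD (PySem.List.pyGetD c i []) j 0
-- c[i][j] := v; i, j are the loop indices 0..3, nonnegative, so .toNat is exact here
def pvSet2 (c : List (List Int)) (i j : Int) (v : Int) : List (List Int) :=
  c.set i.toNat ((PySem.List.pyGetD c i []).set j.toNat v)

def pvMatMul4x4 (a b : List (List Int)) : List (List Int) :=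
  let c0 := (List.range 4).map (fun _ => [0, 0, 0, 0])
  (PySem.List.pyRange 0 4 1).foldl (fun c i =>
    (PySem.List.pyRange 0 4 1).foldl (fun c j =>
      (PySem.List.pyRange 0 4 1).foldl (fun c k =>
        pvSet2 c i j (pvGet2 c i j + pvGet2 a i k * pvGet2 b k j)) c) c) c0

def matrix_math (iterations : Int) : Int :=
  (PySem.List.pyRange 0 iterations 1).foldl
    (fun final_val _ =>
      final_val + pvGet2 (pvMatMul4x4 pvMatA pvMatB) 0 0) 0

-- ===== PORT B =====
def pvAltA : List (List Int) := [[1, 2, 3, 4], [5, 6, 7, 8], [9, 1, 2, 3], [4, 5, 6, 7]]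
def pvAltB : List (List Int) := [[2, 0, 1, 2], [1, 2, 0, 1], [0, 1, 2, 0], [2, 1, 0, 2]]

-- list(zip(*m)): exact for rectangular matrices such as the 4x4 constants here
def pvTranspose (m : List (List Int)) : List (List Int) :=
  match m with
  | [] => []
  | r :: _ => (List.range r.length).map (fun j => m.map (fun row => row.getD j 0))

-- sum(x * y for x, y in zip(row, col))
def pvDot (row col : List Int) : Int :=
  (row.zip col).foldl (fun s p => s + p.1 * p.2) 0

def matrix_math_alt (iterations : Int) : Int :=
  let bt := pvTranspose pvAltB            -- list(zip(*mat_b))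
  let res := pvAltA.map (fun row => bt.map (fun col => pvDot row col))
  ((res.headD []).headD 0) * max iterations 0

-- ===== PRECONDITION & SPEC =====
def Spec_matrix_math (iterations : Int) (out : Int) : Prop := out = matrix_math_alt iterations
instance (iterations : Int) (out : Int) : Decidable (Spec_matrix_math iterations out) := by unfold Spec_matrix_math; infer_instance

-- ===== CLAIM (what is proved, stated in full; the proofs are below) =====
def Claim_equal_matrix_math : Prop := ∀ (iterations : Int), Dom_matrix_math iterations → Spec_matrix_math iterations (matrix_math iterations)

-- ===== LEMMAS AND PROOFS =====

-- the value A adds each iteration is 12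
theorem pv_res00 : pvGet2 (pvMatMul4x4 pvMatA pvMatB) 0 0 = 12 := by decide

-- B's once-computed res[0][0] is 12
theorem pv_alt_res00 :
    (((pvAltA.map (fun row => (pvTranspose pvAltB).map
        (fun col => pvDot row col))).headD []).headD 0) = 12 := by decide

-- folding a constant addition over a list
theorem pv_foldl_const_add (v : Int) (l : List Int) (c : Int) :
    l.foldl (fun acc _ => acc + v) c = c + v * l.length := by
  induction l generalizing c with
  | nil => simp
  | cons x xs ih => simp [List.foldl, ih]; ring

-- ===== VERDICT (by name: the statement is the Claim_ definition above) =====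
theorem matrix_math_spec : Claim_equal_matrix_math := by
  intro iterations _
  show matrix_math iterations = matrix_math_alt iterations
  unfold matrix_math matrix_math_alt
  simp only []
  rw [show (((pvAltA.map (fun row => (pvTranspose pvAltB).map
        (fun col => pvDot row col))).headD []).headD 0) = 12 from pv_alt_res00]
  simp only [pv_res00, pv_foldl_const_add, PySem.List.length_pyRange_one]
  omega
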